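-- pv_equiv track=rewrite | github.com/shenal19/Bug-Prediction | src/code_scanner.py | analyze_python_patterns
-- ===== SOURCE A (Python) =====
-- def analyze_python_patterns(content: str, lines: list):
--     """Analyze Python-specific patterns."""
--     features = {}
--
--     # Imports
--     features["imports_count"] = sum(1 for line in lines if line.strip().startswith(('import ', 'from ')))
--
--     # Indentation analysis
--     max_indent = 0
--     for line in lines:
--         if line.strip():
--             indent = len(line) - len(line.lstrip())
--             max_indent = max(max_indent, indent)
--     features["py_max_indent"] = max_indent
--
--     # Functions and classes
--     features["function_count"] = sum(1 for line in lines if line.strip().startswith('def '))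
--     features["class_count"] = sum(1 for line in lines if line.strip().startswith('class '))
--
--     # Error handling
--     features["error_handling"] = sum(1 for line in lines if any(keyword in line for keyword in ['try:', 'except:', 'finally:']))
--
--     return features
-- ===== SOURCE B (Python) =====
-- def analyze_python_patterns(content: str, lines: list):
--     """Single-pass analysis of Python-specific patterns."""
--     imports_count = 0
--     max_indent = 0
--     function_count = 0
--     class_count = 0
--     error_handling = 0
--     for line in lines:
--         stripped = line.strip()
--         if stripped.startswith(('import ', 'from ')):
--             imports_count += 1
--         if stripped:
--             max_indent = max(max_indent, len(line) - len(line.lstrip()))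
--         if stripped.startswith('def '):
--             function_count += 1
--         if stripped.startswith('class '):
--             class_count += 1
--         if any(keyword in line for keyword in ['try:', 'except:', 'finally:']):
--             error_handling += 1
--     return {
--         "imports_count": imports_count,
--         "py_max_indent": max_indent,
--         "function_count": function_count,
--         "class_count": class_count,
--         "error_handling": error_handling,
--     }
-- ===== Notes on version B (the rewrite author's own statement) =====
-- stated objective: alternative
-- what changed: B fuses A's five separate passes over lines (and the repeated strip() per pass) into one loop that strips each line once and maintains all five counters simultaneously.
import Mathlib
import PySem

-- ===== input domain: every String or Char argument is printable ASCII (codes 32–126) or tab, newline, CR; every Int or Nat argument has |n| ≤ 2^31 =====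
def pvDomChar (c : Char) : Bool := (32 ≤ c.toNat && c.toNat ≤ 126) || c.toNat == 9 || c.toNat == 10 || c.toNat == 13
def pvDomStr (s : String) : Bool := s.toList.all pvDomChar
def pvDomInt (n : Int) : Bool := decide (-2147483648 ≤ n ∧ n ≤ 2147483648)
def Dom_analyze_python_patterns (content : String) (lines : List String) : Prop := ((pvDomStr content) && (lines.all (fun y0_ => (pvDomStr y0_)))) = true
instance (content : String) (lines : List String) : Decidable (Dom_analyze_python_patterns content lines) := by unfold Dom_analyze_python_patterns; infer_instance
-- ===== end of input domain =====

-- B fuses A's five separate passes over `lines` into one single-pass loop maintaining all five counters (alternative decomposition, same cost).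

-- ===== PORT A =====
-- five independent passes, exactly as A's five comprehensions/loop
def pvA_imports (lines : List String) : Int :=
  lines.foldl (fun acc line =>
    if PySem.Str.startswith (PySem.Str.strip line) "import " ||
       PySem.Str.startswith (PySem.Str.strip line) "from " then acc + 1 else acc) 0

def pvA_maxIndent (lines : List String) : Int :=
  lines.foldl (fun m line =>
    if PySem.Str.strip line ≠ "" then
      max m (PySem.Str.len line - PySem.Str.len (PySem.Str.lstrip line))
    else m) 0

def pvA_funcs (lines : List String) : Int :=
  lines.foldl (fun acc line =>
    if PySem.Str.startswith (PySem.Str.strip line) "def " then acc + 1 else acc) 0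

def pvA_classes (lines : List String) : Int :=
  lines.foldl (fun acc line =>
    if PySem.Str.startswith (PySem.Str.strip line) "class " then acc + 1 else acc) 0

def pvA_errors (lines : List String) : Int :=
  lines.foldl (fun acc line =>
    if PySem.Str.isIn "try:" line || PySem.Str.isIn "except:" line ||
       PySem.Str.isIn "finally:" line then acc + 1 else acc) 0

def analyze_python_patterns (content : String) (lines : List String) : List (String × Int) :=
  -- the dict is built with five fresh keys in this insertion order
  [("imports_count", pvA_imports lines),
   ("py_max_indent", pvA_maxIndent lines),
   ("function_count", pvA_funcs lines),
   ("class_count", pvA_classes lines),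
   ("error_handling", pvA_errors lines)]

-- ===== PORT B =====
-- one pass: state = (imports, max_indent, functions, classes, error_handling)
def pvB_step (s : Int × Int × Int × Int × Int) (line : String) : Int × Int × Int × Int × Int :=
  let stripped := PySem.Str.strip line
  let imp := if PySem.Str.startswith stripped "import " || PySem.Str.startswith stripped "from " then s.1 + 1 else s.1
  let ind := if stripped ≠ "" then max s.2.1 (PySem.Str.len line - PySem.Str.len (PySem.Str.lstrip line)) else s.2.1
  let fn := if PySem.Str.startswith stripped "def " then s.2.2.1 + 1 else s.2.2.1
  let cl := if PySem.Str.startswith stripped "class " then s.2.2.2.1 + 1 else s.2.2.2.1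
  let er := if PySem.Str.isIn "try:" line || PySem.Str.isIn "except:" line || PySem.Str.isIn "finally:" line then s.2.2.2.2 + 1 else s.2.2.2.2
  (imp, ind, fn, cl, er)

def analyze_python_patterns_alt (content : String) (lines : List String) : List (String × Int) :=
  let s := lines.foldl pvB_step (0, 0, 0, 0, 0)
  [("imports_count", s.1),
   ("py_max_indent", s.2.1),
   ("function_count", s.2.2.1),
   ("class_count", s.2.2.2.1),
   ("error_handling", s.2.2.2.2)]

-- ===== PRECONDITION & SPEC =====
def Spec_analyze_python_patterns (content : String) (lines : List String) (out : List (String × Int)) : Prop := out = analyze_python_patterns_alt content lines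
instance (content : String) (lines : List String) (out : List (String × Int)) : Decidable (Spec_analyze_python_patterns content lines out) := by unfold Spec_analyze_python_patterns; infer_instance

-- ===== CLAIM (what is proved, stated in full; the proofs are below) =====
def Claim_equal_analyze_python_patterns : Prop := ∀ (content : String) (lines : List String), Dom_analyze_python_patterns content lines → Spec_analyze_python_patterns content lines (analyze_python_patterns content lines)

-- ===== LEMMAS AND PROOFS =====

-- the fused fold computes the five independent folds componentwise
theorem pvFold_eq (lines : List String) (s : Int × Int × Int × Int × Int) :
    lines.foldl pvB_step s =
      (lines.foldl (fun acc line =>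
          if PySem.Str.startswith (PySem.Str.strip line) "import " ||
             PySem.Str.startswith (PySem.Str.strip line) "from " then acc + 1 else acc) s.1,
       lines.foldl (fun m line =>
          if PySem.Str.strip line ≠ "" then
            max m (PySem.Str.len line - PySem.Str.len (PySem.Str.lstrip line))
          else m) s.2.1,
       lines.foldl (fun acc line =>
          if PySem.Str.startswith (PySem.Str.strip line) "def " then acc + 1 else acc) s.2.2.1,
       lines.foldl (fun acc line =>
          if PySem.Str.startswith (PySem.Str.strip line) "class " then acc + 1 else acc) s.2.2.2.1,
       lines.foldl (fun acc line =>
          if PySem.Str.isIn "try:" line || PySem.Str.isIn "except:" line ||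
             PySem.Str.isIn "finally:" line then acc + 1 else acc) s.2.2.2.2) := by
  induction lines generalizing s with
  | nil => rfl
  | cons l t ih =>
    simp only [List.foldl_cons]
    rw [ih]
    simp only [pvB_step]

-- ===== VERDICT (by name: the statement is the Claim_ definition above) =====
theorem analyze_python_patterns_spec : Claim_equal_analyze_python_patterns := by
  intro content lines _
  show _ = _
  simp only [analyze_python_patterns, analyze_python_patterns_alt,
    pvA_imports, pvA_maxIndent, pvA_funcs, pvA_classes, pvA_errors,
    pvFold_eq]
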